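-- pv_equiv track=rewrite | github.com/Panis26/universidad | quinto_semestre/dalgo/proyectos/proy01.py | contarTodo
-- ===== SOURCE A (Python) =====
-- def contarTodo (sec,subsec):
--     cont = 0
--     lista1 = []
--     lista2 = []
--     for i in range(0,len(sec)):
--         if (sec[i] == subsec[1]):
--             lista1.append(i)
--         if (sec[i] == subsec[0]):
--             lista2.append(i)
--
--     for j in lista1:
--         for k in lista2:
--             if (j>k):
--                 cont+=1
--             else:
--                 break
--     return cont
-- ===== SOURCE B (Python) =====
-- def contarTodo(sec, subsec):
--     cont = 0
--     seen = 0
--     for ch in sec: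
--         if ch == subsec[1]:
--             cont += seen
--         if ch == subsec[0]:
--             seen += 1
--     return cont
-- ===== Notes on version B (the rewrite author's own statement) =====
-- stated objective: faster
-- what changed: Replaced the two-pass build of index lists plus a nested pair-counting loop by a single pass over sec that keeps a running count of subsec[0] occurrences and adds it whenever subsec[1] is seen.
import Mathlib
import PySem

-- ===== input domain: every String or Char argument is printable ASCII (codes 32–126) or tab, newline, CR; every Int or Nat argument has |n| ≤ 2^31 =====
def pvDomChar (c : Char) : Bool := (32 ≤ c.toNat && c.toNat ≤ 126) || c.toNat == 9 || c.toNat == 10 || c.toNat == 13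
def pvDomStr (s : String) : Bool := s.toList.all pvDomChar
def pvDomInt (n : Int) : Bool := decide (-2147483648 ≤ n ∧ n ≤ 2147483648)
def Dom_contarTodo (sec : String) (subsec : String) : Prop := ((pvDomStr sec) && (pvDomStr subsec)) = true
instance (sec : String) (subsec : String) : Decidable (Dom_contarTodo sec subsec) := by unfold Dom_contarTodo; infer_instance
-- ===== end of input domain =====

-- B replaces A's quadratic nested pair count by one linear pass with a running occurrence counter (objective: faster).

-- ===== PORT A =====
-- inner 'for k in lista2: if j > k: cont += 1 else: break' — contribution of one j
def contarTodoInner (j : Int) : List Int → Int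
  | [] => 0
  | k :: t => if j > k then 1 + contarTodoInner j t else 0

def contarTodo (sec : String) (subsec : String) : Int :=
  let s := sec.toList
  let t := subsec.toList
  -- first loop: for i in range(0, len(sec)) building lista1, lista2
  let p := (PySem.List.pyRange 0 (PySem.Str.len sec) 1).foldl
    (fun (acc : List Int × List Int) i =>
      let c := PySem.List.pyGetD s i ' '
      let l1 := if c = PySem.List.pyGetD t 1 ' ' then acc.1 ++ [i] else acc.1
      let l2 := if c = PySem.List.pyGetD t 0 ' ' then acc.2 ++ [i] else acc.2
      (l1, l2)) ([], [])
  -- second loop: for j in lista1: cont += inner j lista2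
  p.1.foldl (fun cont j => cont + contarTodoInner j p.2) 0

-- ===== PORT B =====
def contarTodo_alt (sec : String) (subsec : String) : Int :=
  (sec.toList.foldl (fun (st : Int × Int) ch =>
      let cont := if ch = PySem.List.pyGetD subsec.toList 1 ' ' then st.1 + st.2 else st.1
      let seen := if ch = PySem.List.pyGetD subsec.toList 0 ' ' then st.2 + 1 else st.2
      (cont, seen)) (0, 0)).1

-- ===== PRECONDITION & SPEC =====
-- A evaluates subsec[1] only inside the loop over sec, so it raises IndexError exactly when sec is nonempty and subsec has fewer than 2 characters.
def Pre_contarTodo (sec : String) (subsec : String) : Prop :=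
  sec.toList = [] ∨ 2 ≤ subsec.toList.length
instance (sec : String) (subsec : String) : Decidable (Pre_contarTodo sec subsec) := by
  unfold Pre_contarTodo; infer_instance
def pvWitness_contarTodo : String × String := ("abab", "ab")

def Spec_contarTodo (sec : String) (subsec : String) (out : Int) : Prop := out = contarTodo_alt sec subsec
instance (sec : String) (subsec : String) (out : Int) : Decidable (Spec_contarTodo sec subsec out) := by unfold Spec_contarTodo; infer_instance

-- ===== CLAIM (what is proved, stated in full; the proofs are below) =====
def Claim_equal_contarTodo : Prop := ∀ (sec : String) (subsec : String), Dom_contarTodo sec subsec → Pre_contarTodo sec subsec → Spec_contarTodo sec subsec (contarTodo sec subsec)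

-- ===== LEMMAS AND PROOFS =====

-- appending an index ≥ j to lista2 does not change j's contribution (the break fires there)
theorem contarTodoInner_append_ge (j n : Int) (l2 : List Int) (h : j ≤ n) :
    contarTodoInner j (l2 ++ [n]) = contarTodoInner j l2 := by
  induction l2 with
  | nil => simp [contarTodoInner]; omega
  | cons k t ih => simp [contarTodoInner, ih]

-- if every element of lista2 is < j, the inner loop counts all of lista2
theorem contarTodoInner_all_lt (j : Int) (l2 : List Int) (h : ∀ x ∈ l2, x < j) :
    contarTodoInner j l2 = (l2.length : Int) := by
  induction l2 with
  | nil => simp [contarTodoInner]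
  | cons k t ih =>
      have hk : k < j := h k (by simp)
      simp [contarTodoInner, if_pos hk, ih (fun x hx => h x (by simp [hx]))]
      omega

-- the second loop's sum over lista1 ++ [n]
theorem sumInner_append (l1 l2 : List Int) (n : Int) :
    (l1 ++ [n]).foldl (fun cont j => cont + contarTodoInner j l2) 0
      = l1.foldl (fun cont j => cont + contarTodoInner j l2) 0 + contarTodoInner n l2 := by
  simp [List.foldl_append]

-- sum over l1 is invariant under appending an element ≥ every j of l1 to l2
theorem sumInner_congr (l1 l2 : List Int) (n : Int) (h : ∀ x ∈ l1, x ≤ n) :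
    l1.foldl (fun cont j => cont + contarTodoInner j (l2 ++ [n])) 0
      = l1.foldl (fun cont j => cont + contarTodoInner j l2) 0 := by
  have : ∀ (init : Int), ∀ m1 : List Int, (∀ x ∈ m1, x ≤ n) →
      m1.foldl (fun cont j => cont + contarTodoInner j (l2 ++ [n])) init
        = m1.foldl (fun cont j => cont + contarTodoInner j l2) init := by
    intro init m1
    induction m1 generalizing init with
    | nil => intro _; rfl
    | cons j t ih =>
        intro hm
        simp only [List.foldl_cons]
        rw [contarTodoInner_append_ge j n l2 (hm j (by simp))]
        exact ih _ (fun x hx => hm x (by simp [hx]))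
  exact this 0 l1 h

-- the main invariant: after n steps of A's first loop, the second loop's sum and lista2's length
-- equal B's accumulator on the first n characters; all collected indices are < n
theorem contarTodo_invariant (s : List Char) (b a : Char) (n : Nat) (hn : n ≤ s.length) :
    let F := (PySem.List.pyRange 0 (n : Int) 1).foldl
      (fun (acc : List Int × List Int) i =>
        let c := PySem.List.pyGetD s i ' '
        let l1 := if c = b then acc.1 ++ [i] else acc.1
        let l2 := if c = a then acc.2 ++ [i] else acc.2
        (l1, l2)) ([], [])
    let G := (s.take n).foldl (fun (st : Int × Int) ch =>
        let cont := if ch = b then st.1 + st.2 else st.1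
        let seen := if ch = a then st.2 + 1 else st.2
        (cont, seen)) (0, 0)
    (∀ x ∈ F.1, x < (n : Int)) ∧ (∀ x ∈ F.2, x < (n : Int)) ∧
    F.1.foldl (fun cont j => cont + contarTodoInner j F.2) 0 = G.1 ∧
    (F.2.length : Int) = G.2 := by
  induction n with
  | zero =>
      simp [PySem.List.pyRange_one_eq_nil]
  | succ n ih =>
      intro F G
      have hn' : n ≤ s.length := Nat.le_of_succ_le hn
      obtain ⟨h1, h2, h3, h4⟩ := ih hn'
      set step := (fun (acc : List Int × List Int) i =>
        let c := PySem.List.pyGetD s i ' '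
        let l1 := if c = b then acc.1 ++ [i] else acc.1
        let l2 := if c = a then acc.2 ++ [i] else acc.2
        (l1, l2)) with hstep
      set F0 := (PySem.List.pyRange 0 (n : Int) 1).foldl step ([], []) with hF0
      have hrange : PySem.List.pyRange 0 ((n : Nat) + 1 : Int) 1
          = PySem.List.pyRange 0 (n : Int) 1 ++ [(n : Int)] :=
        by simpa using PySem.List.pyRange_one_succ_right (by omega : (0:Int) ≤ (n:Int))
      have hF : F = step F0 (n : Int) := by
        show (PySem.List.pyRange 0 ((n : Nat) + 1 : Int) 1).foldl step ([], []) = _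
        rw [hrange, List.foldl_append]; rfl
      have hlt : n < s.length := hn
      have hc : PySem.List.pyGetD s (n : Int) ' ' = s[n] := by
        rw [PySem.List.pyGetD_natCast]; exact List.getD_eq_getElem s ' ' hlt
      have htake : s.take (n + 1) = s.take n ++ [s[n]] := by
        rw [List.take_add_one]; simp [List.getElem?_eq_getElem hlt]
      set bstep := (fun (st : Int × Int) ch =>
        let cont := if ch = b then st.1 + st.2 else st.1
        let seen := if ch = a then st.2 + 1 else st.2
        (cont, seen)) with hbstep
      set G0 := (s.take n).foldl bstep (0, 0) with hG0
      have hG : G = bstep G0 s[n] := by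
        show (s.take (n + 1)).foldl bstep (0, 0) = _
        rw [htake, List.foldl_append]; rfl
      have hF1 : F.1 = if s[n] = b then F0.1 ++ [(n : Int)] else F0.1 := by
        rw [hF]; simp only [hstep, hc]
      have hF2 : F.2 = if s[n] = a then F0.2 ++ [(n : Int)] else F0.2 := by
        rw [hF]; simp only [hstep, hc]
      have hG1 : G.1 = if s[n] = b then G0.1 + G0.2 else G0.1 := by rw [hG]
      have hG2 : G.2 = if s[n] = a then G0.2 + 1 else G0.2 := by rw [hG]
      refine ⟨?_, ?_, ?_, ?_⟩
      · rw [hF1]; intro x hx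
        by_cases hb : s[n] = b
        · rw [if_pos hb] at hx
          rcases List.mem_append.mp hx with hx | hx
          · exact lt_trans (h1 x hx) (by omega)
          · simp at hx; omega
        · rw [if_neg hb] at hx
          exact lt_trans (h1 x hx) (by omega)
      · rw [hF2]; intro x hx
        by_cases ha : s[n] = a
        · rw [if_pos ha] at hx
          rcases List.mem_append.mp hx with hx | hx
          · exact lt_trans (h2 x hx) (by omega)
          · simp at hx; omega
        · rw [if_neg ha] at hx
          exact lt_trans (h2 x hx) (by omega)
      · rw [hF1, hF2, hG1]
        by_cases hb : s[n] = b <;> by_cases ha : s[n] = a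
        · rw [if_pos hb, if_pos ha, if_pos hb,
            sumInner_append, sumInner_congr _ _ _ (fun x hx => le_of_lt (h1 x hx)),
            contarTodoInner_append_ge _ _ _ (le_refl _),
            contarTodoInner_all_lt _ _ h2, h3, h4]
        · rw [if_pos hb, if_neg ha, if_pos hb, sumInner_append,
            contarTodoInner_all_lt _ _ h2, h3, h4]
        · rw [if_neg hb, if_pos ha, if_neg hb,
            sumInner_congr _ _ _ (fun x hx => le_of_lt (h1 x hx)), h3]
        · rw [if_neg hb, if_neg ha, if_neg hb]; exact h3
      · rw [hF2, hG2]
        by_cases ha : s[n] = a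
        · rw [if_pos ha, if_pos ha]
          simp only [List.length_append, List.length_singleton]
          push_cast
          omega
        · rw [if_neg ha, if_neg ha]; exact h4

-- ===== VERDICT (by name: the statement is the Claim_ definition above) =====
theorem contarTodo_spec : Claim_equal_contarTodo := by
  intro sec subsec _ _
  unfold Spec_contarTodo contarTodo contarTodo_alt
  have h := contarTodo_invariant sec.toList
      (PySem.List.pyGetD subsec.toList 1 ' ') (PySem.List.pyGetD subsec.toList 0 ' ')
      sec.toList.length (le_refl _)
  simp only [List.take_length] at h
  have hlen : PySem.Str.len sec = (sec.toList.length : Int) := by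
    simp [PySem.Str.len_eq]
  rw [hlen]
  exact h.2.2.1
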